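-- pv_equiv track=rewrite | github.com/aavocardo/datastructures | cw.py | binaryMultiply
-- ===== SOURCE A (Python) =====
-- def binaryMultiply(a, b):
--     i, remainder, product, total = 0, 0, 0, []
--
--     while a != 0 or b != 0:
--         total.insert(i, (((a % 10) + (b % 10) + remainder) % 2))
--         remainder = int(((a % 10) + (b % 10) + remainder / 2))
--         a, b = int(a/10), int(b/10)
--         i = i + 1
--
--     if remainder != 0:
--         total.insert(i, remainder)
--         i = i + 1
--     i = i - 1
--     while i >= 0:
--         product = (product * 10) + total[i]
--         i = i - 1
--     return product
-- ===== SOURCE B (Python) =====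
-- def binaryMultiply(a, b):
--     remainder, place, product = 0, 1, 0
--     while a != 0 or b != 0:
--         product += (((a % 10) + (b % 10) + remainder) % 2) * place
--         remainder = int((a % 10) + (b % 10) + remainder / 2)
--         a, b = int(a / 10), int(b / 10)
--         place *= 10
--     if remainder != 0:
--         product += remainder * place
--     return product
-- ===== Notes on version B (the rewrite author's own statement) =====
-- stated objective: simpler
-- what changed: B drops A's digit list and second reconstruction loop: a single loop accumulates product directly with a running place value (place *= 10), adding the trailing remainder at the final place.
import Mathlib
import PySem

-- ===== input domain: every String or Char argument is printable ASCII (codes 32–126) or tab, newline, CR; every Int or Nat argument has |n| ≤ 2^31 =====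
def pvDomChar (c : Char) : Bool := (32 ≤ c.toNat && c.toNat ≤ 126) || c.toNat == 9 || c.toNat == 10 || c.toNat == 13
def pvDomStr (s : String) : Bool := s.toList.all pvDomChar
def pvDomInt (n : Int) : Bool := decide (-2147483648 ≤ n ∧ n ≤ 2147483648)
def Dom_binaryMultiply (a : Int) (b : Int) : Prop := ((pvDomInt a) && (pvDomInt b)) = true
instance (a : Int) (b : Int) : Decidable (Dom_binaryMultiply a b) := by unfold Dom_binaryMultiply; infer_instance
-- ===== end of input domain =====

-- B replaces A's digit list and second reconstruction loop by a single loop that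
-- accumulates product directly with a running place value (simpler: one loop, no list).
-- Python's int(x/10) (float truncation) is ported as Int truncating division
-- PySem.Int.truncdiv, exact for the |n| ≤ 2^31 domain; int(s + rem/2) is ported as
-- truncdiv (2*s + rem) 2, exact since s + rem/2 = (2*s + rem)/2 with small operands.
-- The while loops terminate because |a| + |b| strictly decreases; the ports run them
-- with fuel = |a| + |b| (resp. the index count), which is exactly enough, so the
-- fuel-0 branch is never the observed result.

-- ===== PORT A =====
-- the first while loop: state (a, b, remainder, i, total); returns (total, i, remainder)
def binaryMultiplyLoop : Nat → Int → Int → Int → Int → List Int → List Int × Int × Int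
  | 0, _, _, remainder, i, total => (total, i, remainder)
  | fuel + 1, a, b, remainder, i, total =>
    if a ≠ 0 ∨ b ≠ 0 then
      binaryMultiplyLoop fuel (PySem.Int.truncdiv a 10) (PySem.Int.truncdiv b 10)
        (PySem.Int.truncdiv (2 * (PySem.Int.mod a 10 + PySem.Int.mod b 10) + remainder) 2)
        (i + 1)
        (PySem.List.insert total i (PySem.Int.mod (PySem.Int.mod a 10 + PySem.Int.mod b 10 + remainder) 2))
    else (total, i, remainder)

-- the second while loop: product reconstruction from index i down to 0
-- (total[i] is always in range when called from binaryMultiply; getD 0 is dead code)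
def binaryMultiplyRecon : Nat → List Int → Int → Int → Int
  | 0, _, _, product => product
  | fuel + 1, total, i, product =>
    if 0 ≤ i then
      binaryMultiplyRecon fuel total (i - 1) (product * 10 + (PySem.List.pyGet? total i).getD 0)
    else product

def binaryMultiply (a : Int) (b : Int) : Int :=
  let r := binaryMultiplyLoop (a.natAbs + b.natAbs) a b 0 0 []
  let total := r.1
  let i := r.2.1
  let remainder := r.2.2
  let total2 := if remainder ≠ 0 then PySem.List.insert total i remainder else total
  let i2 := if remainder ≠ 0 then i + 1 else i
  binaryMultiplyRecon (i2.toNat + 1) total2 (i2 - 1) 0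

-- ===== PORT B =====
-- single loop: running place value, product accumulated directly
def binaryMultiplyLoopB : Nat → Int → Int → Int → Int → Int → Int
  | 0, _, _, remainder, place, product =>
    if remainder ≠ 0 then product + remainder * place else product
  | fuel + 1, a, b, remainder, place, product =>
    if a ≠ 0 ∨ b ≠ 0 then
      binaryMultiplyLoopB fuel (PySem.Int.truncdiv a 10) (PySem.Int.truncdiv b 10)
        (PySem.Int.truncdiv (2 * (PySem.Int.mod a 10 + PySem.Int.mod b 10) + remainder) 2)
        (place * 10)
        (product + PySem.Int.mod (PySem.Int.mod a 10 + PySem.Int.mod b 10 + remainder) 2 * place)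
    else if remainder ≠ 0 then product + remainder * place else product

def binaryMultiply_alt (a : Int) (b : Int) : Int :=
  binaryMultiplyLoopB (a.natAbs + b.natAbs) a b 0 1 0

-- ===== PRECONDITION & SPEC =====
def Spec_binaryMultiply (a : Int) (b : Int) (out : Int) : Prop := out = binaryMultiply_alt a b
instance (a : Int) (b : Int) (out : Int) : Decidable (Spec_binaryMultiply a b out) := by unfold Spec_binaryMultiply; infer_instance

-- ===== CLAIM (what is proved, stated in full; the proofs are below) =====
def Claim_equal_binaryMultiply : Prop := ∀ (a : Int) (b : Int), Dom_binaryMultiply a b → Spec_binaryMultiply a b (binaryMultiply a b)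

-- ===== LEMMAS AND PROOFS =====

-- the digit stream of the shared loop, as a pure list, plus the final remainder
def pvDigits : Nat → Int → Int → Int → List Int × Int
  | 0, _, _, remainder => ([], remainder)
  | fuel + 1, a, b, remainder =>
    if a ≠ 0 ∨ b ≠ 0 then
      let p := pvDigits fuel (PySem.Int.truncdiv a 10) (PySem.Int.truncdiv b 10)
        (PySem.Int.truncdiv (2 * (PySem.Int.mod a 10 + PySem.Int.mod b 10) + remainder) 2)
      (PySem.Int.mod (PySem.Int.mod a 10 + PySem.Int.mod b 10 + remainder) 2 :: p.1, p.2)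
    else ([], remainder)

-- value of a little-endian digit list
def pvVal : List Int → Int
  | [] => 0
  | d :: l => d + 10 * pvVal l

theorem pvVal_take_succ (l : List Int) (n : Nat) (h : n < l.length) :
    pvVal (l.take (n + 1)) = pvVal (l.take n) + l[n] * 10 ^ n := by
  induction l generalizing n with
  | nil => simp at h
  | cons x xs ih =>
    cases n with
    | zero => simp [pvVal]
    | succ m =>
      simp only [List.take_succ_cons, pvVal, List.getElem_cons_succ]
      rw [ih m (by simpa using h)]
      ring

theorem pvVal_append_singleton (l : List Int) (d : Int) :
    pvVal (l ++ [d]) = pvVal l + 10 ^ l.length * d := by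
  induction l with
  | nil => simp [pvVal]
  | cons x xs ih => simp [pvVal, ih]; ring

theorem loopA_eq (fuel : Nat) : ∀ (a b remainder i : Int) (total : List Int),
    a.natAbs + b.natAbs ≤ fuel → i = (total.length : Int) →
    binaryMultiplyLoop fuel a b remainder i total =
      (total ++ (pvDigits fuel a b remainder).1,
       i + ((pvDigits fuel a b remainder).1.length : Int),
       (pvDigits fuel a b remainder).2) := by
  induction fuel with
  | zero =>
    intro a b remainder i total hn _
    have ha : a = 0 := by omega
    have hb : b = 0 := by omega
    subst ha; subst hb; simp [binaryMultiplyLoop, pvDigits]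
  | succ fuel ih =>
    intro a b remainder i total hn hi
    by_cases h : a ≠ 0 ∨ b ≠ 0
    · rw [binaryMultiplyLoop, if_pos h, pvDigits, if_pos h]
      have h1 : (PySem.Int.truncdiv a 10).natAbs = a.natAbs / 10 := Int.natAbs_tdiv a 10
      have h2 : (PySem.Int.truncdiv b 10).natAbs = b.natAbs / 10 := Int.natAbs_tdiv b 10
      have hlt : (PySem.Int.truncdiv a 10).natAbs + (PySem.Int.truncdiv b 10).natAbs ≤ fuel := by
        rcases h with h | h
        · have : a.natAbs ≠ 0 := by simpa using h
          omega
        · have : b.natAbs ≠ 0 := by simpa using h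
          omega
      subst hi
      rw [PySem.List.insert_length]
      rw [ih _ _ _ _ (total ++ _) hlt (by simp)]
      simp only [List.append_assoc, List.singleton_append, List.length_cons, Prod.mk.injEq]
      refine ⟨trivial, by push_cast; ring, trivial⟩
    · rw [binaryMultiplyLoop, if_neg h, pvDigits, if_neg h]
      simp

theorem recon_eq (n : Nat) (total : List Int) :
    ∀ (p : Int) (fuel : Nat), n ≤ total.length → n + 1 ≤ fuel →
    binaryMultiplyRecon fuel total ((n : Int) - 1) p = p * 10 ^ n + pvVal (total.take n) := by
  induction n with
  | zero =>
    intro p fuel _ hf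
    obtain ⟨f, rfl⟩ : ∃ f, fuel = f + 1 := ⟨fuel - 1, by omega⟩
    rw [binaryMultiplyRecon, if_neg (by omega)]
    simp [pvVal]
  | succ m ih =>
    intro p fuel h hf
    obtain ⟨f, rfl⟩ : ∃ f, fuel = f + 1 := ⟨fuel - 1, by omega⟩
    rw [binaryMultiplyRecon, if_pos (by push_cast; omega)]
    have hm : m < total.length := by omega
    have hget : PySem.List.pyGet? total (((m + 1 : Nat) : Int) - 1) = some total[m] := by
      have : (((m + 1 : Nat) : Int) - 1) = (m : Int) := by push_cast; ring
      rw [this, PySem.List.pyGet?_natCast]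
      simp [hm]
    have harg : (((m + 1 : Nat) : Int) - 1 - 1) = (m : Int) - 1 := by push_cast; ring
    rw [hget, Option.getD_some, harg, ih _ f (by omega) (by omega), pvVal_take_succ total m hm]
    ring

theorem loopB_eq (fuel : Nat) : ∀ (a b remainder place product : Int),
    a.natAbs + b.natAbs ≤ fuel →
    binaryMultiplyLoopB fuel a b remainder place product =
      product + place * (pvVal (pvDigits fuel a b remainder).1
        + 10 ^ (pvDigits fuel a b remainder).1.length * (pvDigits fuel a b remainder).2) := by
  induction fuel with
  | zero =>
    intro a b remainder place product _
    rw [binaryMultiplyLoopB, pvDigits]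
    simp only [pvVal, List.length_nil, pow_zero]
    split_ifs with hr
    · ring
    · simp at hr
      simp [hr]
  | succ fuel ih =>
    intro a b remainder place product hn
    by_cases h : a ≠ 0 ∨ b ≠ 0
    · rw [binaryMultiplyLoopB, if_pos h, pvDigits, if_pos h]
      have h1 : (PySem.Int.truncdiv a 10).natAbs = a.natAbs / 10 := Int.natAbs_tdiv a 10
      have h2 : (PySem.Int.truncdiv b 10).natAbs = b.natAbs / 10 := Int.natAbs_tdiv b 10
      have hlt : (PySem.Int.truncdiv a 10).natAbs + (PySem.Int.truncdiv b 10).natAbs ≤ fuel := by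
        rcases h with h | h
        · have : a.natAbs ≠ 0 := by simpa using h
          omega
        · have : b.natAbs ≠ 0 := by simpa using h
          omega
      rw [ih _ _ _ _ _ hlt]
      simp only [List.length_cons, pvVal]
      ring
    · rw [binaryMultiplyLoopB, if_neg h, pvDigits, if_neg h]
      simp only [pvVal, List.length_nil, pow_zero]
      split_ifs with hr
      · ring
      · simp at hr
        simp [hr]

-- ===== VERDICT (by name: the statement is the Claim_ definition above) =====
theorem binaryMultiply_spec : Claim_equal_binaryMultiply := by
  intro a b _
  unfold Spec_binaryMultiply binaryMultiply binaryMultiply_alt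
  rw [loopB_eq _ a b 0 1 0 le_rfl]
  simp only [loopA_eq (a.natAbs + b.natAbs) a b 0 0 [] le_rfl (by simp),
    List.nil_append, zero_add]
  set fuel := a.natAbs + b.natAbs with hfuel
  by_cases hr : (pvDigits fuel a b 0).2 = 0
  · simp only [hr, ne_eq, not_true_eq_false, if_false]
    have hn : ((pvDigits fuel a b 0).1.length : Int).toNat = (pvDigits fuel a b 0).1.length := by
      omega
    rw [hn, recon_eq (pvDigits fuel a b 0).1.length _ 0 _ le_rfl le_rfl]
    rw [List.take_of_length_le le_rfl]
    simp
  · simp only [hr, ne_eq, not_false_eq_true, if_true]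
    rw [PySem.List.insert_length]
    have hn : (((pvDigits fuel a b 0).1.length : Int) + 1).toNat
        = (pvDigits fuel a b 0).1.length + 1 := by omega
    have hc : ((pvDigits fuel a b 0).1.length : Int) + 1 - 1
        = (((pvDigits fuel a b 0).1.length + 1 : Nat) : Int) - 1 := by push_cast; ring
    rw [hn, hc, recon_eq ((pvDigits fuel a b 0).1.length + 1) _ 0 _ (by simp) le_rfl]
    rw [List.take_of_length_le (by simp), pvVal_append_singleton]
    ring
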